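-- pv_equiv track=rewrite | github.com/HideInSky/AI_Projects_Python | Hill Climbing/nqueens.py | f
-- ===== SOURCE A (Python) =====
-- def f(state):
--     f = 0
--     for x1, y1 in enumerate(state):
--         for x2, y2 in enumerate(state):
--             if x1 == x2: # same tile
--                 pass
--             elif y1 == y2: # same row
--                 f += 1
--                 break
--             elif abs(x1 - x2) == abs(y1 - y2): # same diagonal
--                 f +=1
--                 break
--             else:
--                 pass
--     return f
-- ===== SOURCE B (Python) =====
-- # B: one pass builds per-row/diagonal/anti-diagonal counts, then flags queens
-- # whose group has more than one member -- O(n) instead of A's O(n^2).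
-- def f(state):
--     rows = {}
--     diag = {}
--     anti = {}
--     for x, y in enumerate(state):
--         rows[y] = rows.get(y, 0) + 1
--         diag[x - y] = diag.get(x - y, 0) + 1
--         anti[x + y] = anti.get(x + y, 0) + 1
--     total = 0
--     for x, y in enumerate(state):
--         if rows[y] > 1 or diag[x - y] > 1 or anti[x + y] > 1:
--             total += 1
--     return total
-- ===== Notes on version B (the rewrite author's own statement) =====
-- stated objective: faster
-- what changed: Replaced the quadratic all-pairs scan (with early break per queen) by one pass building row/diagonal/anti-diagonal hash counts and a second pass flagging queens whose group count exceeds one.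
import Mathlib
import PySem

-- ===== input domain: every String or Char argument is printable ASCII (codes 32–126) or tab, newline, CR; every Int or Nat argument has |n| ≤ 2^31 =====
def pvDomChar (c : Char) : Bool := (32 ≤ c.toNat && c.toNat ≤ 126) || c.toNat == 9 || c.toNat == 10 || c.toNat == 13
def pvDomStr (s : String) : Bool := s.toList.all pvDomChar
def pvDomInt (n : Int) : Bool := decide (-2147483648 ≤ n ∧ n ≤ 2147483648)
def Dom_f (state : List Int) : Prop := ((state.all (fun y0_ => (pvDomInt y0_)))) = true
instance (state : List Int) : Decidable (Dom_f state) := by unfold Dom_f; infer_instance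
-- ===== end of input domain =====

-- B replaces A's quadratic all-pairs scan by linear row/diagonal/anti-diagonal
-- counting; same return value everywhere (objective: faster).

-- ===== PORT A =====
-- inner 'for x2, y2 in enumerate(state)' loop: returns the contribution (1 on break, 0 at loop end)
def innerA (x1 y1 : Int) : List (Int × Int) → Int
  | [] => 0
  | (x2, y2) :: rest =>
    if x1 = x2 then innerA x1 y1 rest
    else if y1 = y2 then 1
    else if (x1 - x2).natAbs = (y1 - y2).natAbs then 1
    else innerA x1 y1 rest

def f (state : List Int) : Int :=
  let pairs := PySem.List.enumerate state 0
  pairs.foldl (fun acc p => acc + innerA p.1 p.2 pairs) 0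

-- ===== PORT B =====
def f_alt (state : List Int) : Int :=
  let pairs := PySem.List.enumerate state 0
  let ds := pairs.foldl
    (fun (t : PySem.Dict Int Int × PySem.Dict Int Int × PySem.Dict Int Int) p =>
      (t.1.modify p.2 0 (· + 1),
       t.2.1.modify (p.1 - p.2) 0 (· + 1),
       t.2.2.modify (p.1 + p.2) 0 (· + 1)))
    (PySem.Dict.empty, PySem.Dict.empty, PySem.Dict.empty)
  pairs.foldl
    (fun acc p =>
      if 1 < ds.1.getD p.2 0 ∨ 1 < ds.2.1.getD (p.1 - p.2) 0 ∨ 1 < ds.2.2.getD (p.1 + p.2) 0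
      then acc + 1 else acc) 0

-- ===== PRECONDITION & SPEC =====
def Spec_f (state : List Int) (out : Int) : Prop := out = f_alt state
instance (state : List Int) (out : Int) : Decidable (Spec_f state out) := by unfold Spec_f; infer_instance

-- ===== CLAIM (what is proved, stated in full; the proofs are below) =====
def Claim_equal_f : Prop := ∀ (state : List Int), Dom_f state → Spec_f state (f state)

-- ===== LEMMAS AND PROOFS =====

-- A's inner loop finds a conflicting queen iff one exists
theorem innerA_eq_ite (x1 y1 : Int) (l : List (Int × Int)) :
    innerA x1 y1 l =
      if ∃ q ∈ l, q.1 ≠ x1 ∧ (q.2 = y1 ∨ (x1 - q.1).natAbs = (y1 - q.2).natAbs)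
      then 1 else 0 := by
  induction l with
  | nil => simp [innerA]
  | cons q rest ih =>
    obtain ⟨x2, y2⟩ := q
    by_cases h1 : x1 = x2
    · simp only [innerA, if_pos h1, ih]
      congr 1
      simp only [List.mem_cons, eq_iff_iff]
      constructor
      · rintro ⟨q, hq, hne, hc⟩; exact ⟨q, .inr hq, hne, hc⟩
      · rintro ⟨q, hq | hq, hne, hc⟩
        · subst hq; exact absurd h1.symm hne
        · exact ⟨q, hq, hne, hc⟩
    · by_cases h2 : y1 = y2
      · simp only [innerA, if_neg h1, if_pos h2]
        rw [if_pos ⟨(x2, y2), List.mem_cons_self, fun h => h1 h.symm, .inl h2.symm⟩]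
      · by_cases h3 : (x1 - x2).natAbs = (y1 - y2).natAbs
        · simp only [innerA, if_neg h1, if_neg h2, if_pos h3]
          rw [if_pos ⟨(x2, y2), List.mem_cons_self, fun h => h1 h.symm, .inr h3⟩]
        · simp only [innerA, if_neg h1, if_neg h2, if_neg h3, ih]
          congr 1
          simp only [List.mem_cons, eq_iff_iff]
          constructor
          · rintro ⟨q, hq, hne, hc⟩; exact ⟨q, .inr hq, hne, hc⟩
          · rintro ⟨q, hq | hq, hne, hc⟩
            · subst hq
              rcases hc with hc | hc
              · exact absurd hc.symm h2
              · exact absurd hc h3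
            · exact ⟨q, hq, hne, hc⟩

-- a foldl accumulating 'acc + (if p then 1 else 0)' is a countP
theorem foldl_add_ite_count {α : Type} (p : α → Prop) [DecidablePred p]
    (l : List α) (a : Int) :
    l.foldl (fun acc x => acc + if p x then 1 else 0) a
      = a + (l.countP (fun x => decide (p x)) : Int) := by
  induction l generalizing a with
  | nil => simp
  | cons x xs ih =>
    simp only [List.foldl_cons, ih, List.countP_cons]
    by_cases h : p x <;> simp [h, add_comm, add_assoc]

-- a foldl accumulating 'if p then acc + 1 else acc' is a countP
theorem foldl_ite_add_count {α : Type} (p : α → Prop) [DecidablePred p]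
    (l : List α) (a : Int) :
    l.foldl (fun acc x => if p x then acc + 1 else acc) a
      = a + (l.countP (fun x => decide (p x)) : Int) := by
  induction l generalizing a with
  | nil => simp
  | cons x xs ih =>
    simp only [List.foldl_cons, ih, List.countP_cons]
    by_cases h : p x <;> simp [h, add_comm, add_assoc]

-- the triple-dict foldl splits componentwise
theorem foldl_triple (l : List (Int × Int))
    (a b c : PySem.Dict Int Int) :
    l.foldl
      (fun (t : PySem.Dict Int Int × PySem.Dict Int Int × PySem.Dict Int Int) p =>
        (t.1.modify p.2 0 (· + 1),
         t.2.1.modify (p.1 - p.2) 0 (· + 1),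
         t.2.2.modify (p.1 + p.2) 0 (· + 1))) (a, b, c)
    = (l.foldl (fun d p => d.modify p.2 0 (· + 1)) a,
       l.foldl (fun d p => d.modify (p.1 - p.2) 0 (· + 1)) b,
       l.foldl (fun d p => d.modify (p.1 + p.2) 0 (· + 1)) c) := by
  induction l generalizing a b c with
  | nil => rfl
  | cons x xs ih => simp only [List.foldl_cons, ih]

-- getD of a counting foldl keyed by g = countP of 'g · = key'
theorem getD_count_foldl_aux (g : Int × Int → Int) (l : List (Int × Int)) (v : Int)
    (d : PySem.Dict Int Int) :
    (l.foldl (fun d p => d.modify (g p) 0 (· + 1)) d).getD v 0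
      = d.getD v 0 + (l.countP (fun p => g p == v) : Int) := by
  induction l generalizing d with
  | nil => simp
  | cons p rest ih =>
    simp only [List.foldl_cons, ih, List.countP_cons, PySem.Dict.getD_modify]
    by_cases h : g p = v
    · simp [h]; ring
    · simp [h, Ne.symm h, (beq_iff_eq (a := g p) (b := v))]

theorem getD_count_foldl (g : Int × Int → Int) (l : List (Int × Int)) (v : Int) :
    (l.foldl (fun d p => d.modify (g p) 0 (· + 1)) PySem.Dict.empty).getD v 0
      = (l.countP (fun p => g p == v) : Int) := by
  rw [getD_count_foldl_aux, PySem.Dict.getD_empty]; ring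

-- countP > 1 with a known member satisfying p ↔ another member satisfies p
theorem one_lt_countP_iff {α : Type} [DecidableEq α] (l : List α) (hnd : l.Nodup)
    (p : α → Bool) (x : α) (hx : x ∈ l) (hpx : p x = true) :
    1 < l.countP p ↔ ∃ q ∈ l, q ≠ x ∧ p q = true := by
  have hperm : l.Perm (x :: l.erase x) := List.perm_cons_erase hx
  rw [hperm.countP_eq]
  simp only [List.countP_cons, hpx, if_pos]
  constructor
  · intro h
    have hpos : 0 < (l.erase x).countP p := by omega
    obtain ⟨q, hq, hpq⟩ := List.countP_pos_iff.mp hpos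
    exact ⟨q, (hnd.mem_erase_iff.mp hq).2,
           (hnd.mem_erase_iff.mp hq).1, hpq⟩
  · rintro ⟨q, hq, hne, hpq⟩
    have : q ∈ l.erase x := hnd.mem_erase_iff.mpr ⟨hne, hq⟩
    have : 0 < (l.erase x).countP p := List.countP_pos_iff.mpr ⟨q, this, hpq⟩
    omega

-- first components of enumerate are pairwise distinct ⇒ injectivity on members + nodup
theorem enumerate_fst_inj (xs : List Int) {p q : Int × Int}
    (hp : p ∈ PySem.List.enumerate xs 0) (hq : q ∈ PySem.List.enumerate xs 0)
    (h : p.1 = q.1) : p = q := by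
  have hpw : (PySem.List.enumerate xs 0).Pairwise (fun a b => a.1 ≠ b.1) :=
    (PySem.List.pairwise_lt_enumerate xs 0).imp (fun h => ne_of_lt h)
  by_contra hne
  exact (hpw.forall (fun a b h1 h2 => (h1 h2.symm)) hp hq hne) h

theorem enumerate_nodup (xs : List Int) : (PySem.List.enumerate xs 0).Nodup :=
  (PySem.List.pairwise_lt_enumerate xs 0).imp
    (fun h => by intro he; exact absurd (congrArg Prod.fst he) (ne_of_lt h))

-- ===== VERDICT (by name: the statement is the Claim_ definition above) =====
theorem f_spec : Claim_equal_f := by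
  intro state _
  unfold Spec_f f f_alt
  simp only [foldl_triple, innerA_eq_ite]
  set pairs := PySem.List.enumerate state 0 with hpairs
  rw [foldl_add_ite_count, foldl_ite_add_count]
  simp only [getD_count_foldl]
  congr 2
  apply List.countP_congr
  intro p hp
  simp only [decide_eq_true_eq, Nat.one_lt_cast]
  have hnd := enumerate_nodup state
  rw [one_lt_countP_iff pairs hnd _ p hp (by simp),
      one_lt_countP_iff pairs hnd _ p hp (by simp),
      one_lt_countP_iff pairs hnd _ p hp (by simp)]
  constructor
  · rintro ⟨q, hq, hne, hc⟩
    have hqp : q ≠ p := fun he => hne (by rw [he])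
    rcases hc with hc | hc
    · exact .inl ⟨q, hq, hqp, by simp [hc]⟩
    · rcases Int.natAbs_eq_natAbs_iff.mp hc with hc | hc
      · exact .inr (.inl ⟨q, hq, hqp, by simp; omega⟩)
      · exact .inr (.inr ⟨q, hq, hqp, by simp; omega⟩)
  · intro h
    have conv : ∀ q ∈ pairs, q ≠ p → q.1 ≠ p.1 :=
      fun q hq hne he => hne (enumerate_fst_inj state hq hp he)
    rcases h with ⟨q, hq, hne, hc⟩ | ⟨q, hq, hne, hc⟩ | ⟨q, hq, hne, hc⟩
    · exact ⟨q, hq, conv q hq hne, .inl (by simpa using hc)⟩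
    · refine ⟨q, hq, conv q hq hne, .inr ?_⟩
      simp at hc
      apply Int.natAbs_eq_natAbs_iff.mpr; omega
    · refine ⟨q, hq, conv q hq hne, .inr ?_⟩
      simp at hc
      apply Int.natAbs_eq_natAbs_iff.mpr; omega
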